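-- pv_equiv track=rewrite | github.com/xiaodianzheng/Olivia | q4a.py | check_seating_arrangement
-- ===== SOURCE A (Python) =====
-- def check_seating_arrangement(arrangement, must_list, cannot_list):
--     arrangement_set = set()
--     for i in range(len(arrangement)):
--         if i == len(arrangement) - 1:
--             arrangement_set.add((arrangement[i], arrangement[i - 1]))
--             arrangement_set.add((arrangement[i], arrangement[0]))
--         else:
--             arrangement_set.add((arrangement[i], arrangement[i - 1]))
--             arrangement_set.add((arrangement[i], arrangement[i + 1]))
--     must_set = set(must_list)
--     cannot_set = set(cannot_list)
--     if must_set.issubset(arrangement_set) and cannot_set.isdisjoint(arrangement_set):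
--         return True
--     else:
--         return False
-- ===== SOURCE B (Python) =====
-- def check_seating_arrangement(arrangement, must_list, cannot_list):
--     n = len(arrangement)
--
--     def adjacent(pair):
--         return any(pair == (arrangement[i], arrangement[i - 1])
--                    or pair == (arrangement[i], arrangement[(i + 1) % n])
--                    for i in range(n))
--
--     return all(adjacent(p) for p in must_list) and not any(adjacent(p) for p in cannot_list)
-- ===== Notes on version B (the rewrite author's own statement) =====
-- stated objective: simpler
-- what changed: B drops the precomputed adjacency-pair set entirely and instead tests each constraint with a per-pair scan adjacent(pair) over the circular arrangement (using i-1 and (i+1)%n), folding the subset/disjoint set algebra into plain all/any over the constraint lists.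
import Mathlib
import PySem

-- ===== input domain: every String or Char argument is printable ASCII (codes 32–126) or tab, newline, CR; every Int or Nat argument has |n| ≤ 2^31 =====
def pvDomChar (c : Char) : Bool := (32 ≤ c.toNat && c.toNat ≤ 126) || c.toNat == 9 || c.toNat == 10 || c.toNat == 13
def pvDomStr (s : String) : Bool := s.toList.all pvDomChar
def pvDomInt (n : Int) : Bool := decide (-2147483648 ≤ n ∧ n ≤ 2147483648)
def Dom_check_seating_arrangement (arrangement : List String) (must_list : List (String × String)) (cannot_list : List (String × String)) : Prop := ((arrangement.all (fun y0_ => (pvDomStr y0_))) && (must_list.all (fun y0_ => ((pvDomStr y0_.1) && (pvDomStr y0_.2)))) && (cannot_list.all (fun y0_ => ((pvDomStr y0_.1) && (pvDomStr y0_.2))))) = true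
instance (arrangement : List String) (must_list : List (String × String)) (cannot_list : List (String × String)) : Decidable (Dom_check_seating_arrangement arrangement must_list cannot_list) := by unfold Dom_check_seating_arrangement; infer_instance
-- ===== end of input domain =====

-- B replaces A's precomputed adjacency-pair set by a per-constraint scan of the circular
-- arrangement (objective: simpler; same return value, no side effects).

-- ===== PORT A =====
def check_seating_arrangement (arrangement : List String) (must_list : List (String × String)) (cannot_list : List (String × String)) : Bool :=
  let n : Int := arrangement.length
  let arrangement_set : PySem.Set (String × String) :=
    (PySem.List.pyRange 0 n 1).foldl (fun s i =>
      if i == n - 1 then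
        PySem.Set.add
          (PySem.Set.add s (PySem.List.pyGetD arrangement i "", PySem.List.pyGetD arrangement (i - 1) ""))
          (PySem.List.pyGetD arrangement i "", PySem.List.pyGetD arrangement 0 "")
      else
        PySem.Set.add
          (PySem.Set.add s (PySem.List.pyGetD arrangement i "", PySem.List.pyGetD arrangement (i - 1) ""))
          (PySem.List.pyGetD arrangement i "", PySem.List.pyGetD arrangement (i + 1) ""))
      PySem.Set.empty
  let must_set := PySem.Set.ofList must_list
  let cannot_set := PySem.Set.ofList cannot_list
  if PySem.Set.issubset must_set arrangement_set && PySem.Set.isdisjoint cannot_set arrangement_set then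
    true
  else
    false

-- ===== PORT B =====
-- B's inner helper 'adjacent(pair)': scan i in range(n), circular neighbours via i-1 and (i+1)%n
def pvAdjacent (arrangement : List String) (n : Int) (pair : String × String) : Bool :=
  (PySem.List.pyRange 0 n 1).any (fun i =>
    pair == (PySem.List.pyGetD arrangement i "", PySem.List.pyGetD arrangement (i - 1) "") ||
    pair == (PySem.List.pyGetD arrangement i "", PySem.List.pyGetD arrangement (PySem.Int.mod (i + 1) n) ""))

def check_seating_arrangement_alt (arrangement : List String) (must_list : List (String × String)) (cannot_list : List (String × String)) : Bool :=
  let n : Int := arrangement.length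
  must_list.all (fun p => pvAdjacent arrangement n p) &&
    !(cannot_list.any (fun p => pvAdjacent arrangement n p))

-- ===== PRECONDITION & SPEC =====
def Spec_check_seating_arrangement (arrangement : List String) (must_list : List (String × String)) (cannot_list : List (String × String)) (out : Bool) : Prop := out = check_seating_arrangement_alt arrangement must_list cannot_list
instance (arrangement : List String) (must_list : List (String × String)) (cannot_list : List (String × String)) (out : Bool) : Decidable (Spec_check_seating_arrangement arrangement must_list cannot_list out) := by unfold Spec_check_seating_arrangement; infer_instance

-- ===== CLAIM (what is proved, stated in full; the proofs are below) =====
def Claim_equal_check_seating_arrangement : Prop := ∀ (arrangement : List String) (must_list : List (String × String)) (cannot_list : List (String × String)), Dom_check_seating_arrangement arrangement must_list cannot_list → Spec_check_seating_arrangement arrangement must_list cannot_list (check_seating_arrangement arrangement must_list cannot_list)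

-- ===== LEMMAS AND PROOFS =====

-- membership in a foldl that adds two elements per step
theorem pvMem_foldl_add2 (l : List Int) (f g : Int → String × String)
    (s0 : PySem.Set (String × String)) (x : String × String) :
    (x ∈ l.foldl (fun s i => PySem.Set.add (PySem.Set.add s (f i)) (g i)) s0) ↔
      x ∈ s0 ∨ ∃ i ∈ l, x = f i ∨ x = g i := by
  induction l generalizing s0 with
  | nil => simp
  | cons a t ih =>
    simp only [List.foldl_cons, ih, PySem.Set.mem_add, List.mem_cons]
    constructor
    · rintro (((h | h) | h) | ⟨i, hi, h⟩)
      · exact Or.inl h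
      · exact Or.inr ⟨a, Or.inl rfl, Or.inl h⟩
      · exact Or.inr ⟨a, Or.inl rfl, Or.inr h⟩
      · exact Or.inr ⟨i, Or.inr hi, h⟩
    · rintro (h | ⟨i, (rfl | hi), h⟩)
      · exact Or.inl (Or.inl (Or.inl h))
      · rcases h with h | h
        · exact Or.inl (Or.inl (Or.inr h))
        · exact Or.inl (Or.inr h)
      · exact Or.inr ⟨i, hi, h⟩

-- the set A builds contains exactly the pairs B's helper recognises
theorem pvMem_arrangement_set (arrangement : List String) (p : String × String) :
    (p ∈ (PySem.List.pyRange 0 (arrangement.length : Int) 1).foldl (fun s i =>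
        if i == (arrangement.length : Int) - 1 then
          PySem.Set.add
            (PySem.Set.add s (PySem.List.pyGetD arrangement i "", PySem.List.pyGetD arrangement (i - 1) ""))
            (PySem.List.pyGetD arrangement i "", PySem.List.pyGetD arrangement 0 "")
        else
          PySem.Set.add
            (PySem.Set.add s (PySem.List.pyGetD arrangement i "", PySem.List.pyGetD arrangement (i - 1) ""))
            (PySem.List.pyGetD arrangement i "", PySem.List.pyGetD arrangement (i + 1) ""))
        PySem.Set.empty) ↔
      pvAdjacent arrangement (arrangement.length : Int) p = true := by
  set n : Int := (arrangement.length : Int) with hn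
  have hfun : (fun (s : PySem.Set (String × String)) i =>
      if i == n - 1 then
        PySem.Set.add
          (PySem.Set.add s (PySem.List.pyGetD arrangement i "", PySem.List.pyGetD arrangement (i - 1) ""))
          (PySem.List.pyGetD arrangement i "", PySem.List.pyGetD arrangement 0 "")
      else
        PySem.Set.add
          (PySem.Set.add s (PySem.List.pyGetD arrangement i "", PySem.List.pyGetD arrangement (i - 1) ""))
          (PySem.List.pyGetD arrangement i "", PySem.List.pyGetD arrangement (i + 1) ""))
      = fun s i =>
        PySem.Set.add
          (PySem.Set.add s (PySem.List.pyGetD arrangement i "", PySem.List.pyGetD arrangement (i - 1) ""))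
          (PySem.List.pyGetD arrangement i "",
            PySem.List.pyGetD arrangement (if i = n - 1 then 0 else i + 1) "") := by
    funext s i
    by_cases h : i = n - 1 <;> simp [h]
  rw [hfun, pvMem_foldl_add2]
  simp only [PySem.Set.empty, List.not_mem_nil, false_or, pvAdjacent, List.any_eq_true,
    Bool.or_eq_true, beq_iff_eq]
  constructor
  · rintro ⟨i, hi, h⟩
    refine ⟨i, hi, ?_⟩
    have hir := (PySem.List.mem_pyRange_one).1 hi
    have hmod : PySem.Int.mod (i + 1) n = if i = n - 1 then 0 else i + 1 := by
      rw [PySem.Int.mod_eq_emod_of_pos (by omega)]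
      by_cases h1 : i = n - 1
      · have h2 : i + 1 = n := by omega
        rw [if_pos h1, h2, Int.emod_self]
      · rw [if_neg h1, Int.emod_eq_of_lt (by omega) (by omega)]
    rw [hmod]
    exact h
  · rintro ⟨i, hi, h⟩
    refine ⟨i, hi, ?_⟩
    have hir := (PySem.List.mem_pyRange_one).1 hi
    have hmod : PySem.Int.mod (i + 1) n = if i = n - 1 then 0 else i + 1 := by
      rw [PySem.Int.mod_eq_emod_of_pos (by omega)]
      by_cases h1 : i = n - 1
      · have h2 : i + 1 = n := by omega
        rw [if_pos h1, h2, Int.emod_self]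
      · rw [if_neg h1, Int.emod_eq_of_lt (by omega) (by omega)]
    rw [hmod] at h
    exact h

-- if c then True else False, as Python writes it
theorem pvIteTF (c : Bool) : (if c = true then true else false) = c := by
  cases c <;> simp

-- ===== VERDICT (by name: the statement is the Claim_ definition above) =====
theorem check_seating_arrangement_spec : Claim_equal_check_seating_arrangement := by
  intro arrangement must_list cannot_list _
  unfold Spec_check_seating_arrangement
  simp only [check_seating_arrangement, check_seating_arrangement_alt, pvIteTF]
  rw [Bool.eq_iff_iff]
  simp only [Bool.and_eq_true, PySem.Set.issubset_iff, PySem.Set.isdisjoint_iff,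
    PySem.Set.mem_ofList, List.all_eq_true, Bool.not_eq_true',
    List.any_eq_false]
  constructor
  · rintro ⟨h1, h2⟩
    exact ⟨fun p hp => (pvMem_arrangement_set arrangement p).1 (h1 p hp),
      fun p hp hadj => h2 p hp ((pvMem_arrangement_set arrangement p).2 hadj)⟩
  · rintro ⟨h1, h2⟩
    exact ⟨fun p hp => (pvMem_arrangement_set arrangement p).2 (h1 p hp),
      fun p hp hmem => h2 p hp ((pvMem_arrangement_set arrangement p).1 hmem)⟩
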